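-- pv_equiv track=rewrite | github.com/shichaoyu1/GraphDiffMult | train_semantic_alignment.py | build_medclip_ignore_ids
-- ===== SOURCE A (Python) =====
-- from collections import Counter, defaultdict
--
-- def build_medclip_ignore_ids(anchor_vocab):
--     buckets = defaultdict(list)
--     for idx, anchor in enumerate(anchor_vocab):
--         key = (anchor.get('source', ''), anchor.get('field', ''))
--         buckets[key].append(idx)
--     ignore_ids = []
--     for anchor in anchor_vocab:
--         key = (anchor.get('source', ''), anchor.get('field', ''))
--         ignore_ids.append(buckets.get(key, []))
--     return ignore_ids
-- ===== SOURCE B (Python) =====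
-- def build_medclip_ignore_ids(anchor_vocab):
--     keys = [(a.get('source', ''), a.get('field', '')) for a in anchor_vocab]
--     return [[j for j, kj in enumerate(keys) if kj == k] for k in keys]
-- ===== Notes on version B (the rewrite author's own statement) =====
-- stated objective: simpler
-- what changed: B drops the defaultdict grouping entirely: it precomputes the key of every anchor once and answers each position by a direct nested scan collecting the indices with an equal key, instead of building and re-querying a bucket dictionary.
import Mathlib
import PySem

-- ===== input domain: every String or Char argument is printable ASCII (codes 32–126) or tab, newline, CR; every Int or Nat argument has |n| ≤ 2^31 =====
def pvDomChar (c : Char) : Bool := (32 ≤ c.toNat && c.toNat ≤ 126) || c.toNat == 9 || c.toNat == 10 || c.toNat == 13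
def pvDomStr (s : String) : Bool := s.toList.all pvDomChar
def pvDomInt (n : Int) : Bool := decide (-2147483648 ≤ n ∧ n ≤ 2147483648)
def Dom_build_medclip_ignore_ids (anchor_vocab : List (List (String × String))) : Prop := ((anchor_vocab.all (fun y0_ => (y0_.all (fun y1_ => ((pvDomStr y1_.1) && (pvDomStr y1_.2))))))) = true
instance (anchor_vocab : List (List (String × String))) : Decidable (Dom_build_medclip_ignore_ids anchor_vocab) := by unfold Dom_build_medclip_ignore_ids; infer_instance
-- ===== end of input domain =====

-- B replaces A's build-then-requery defaultdict with a single nested scan over precomputed keys (no dictionary at all); objective: simpler.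

-- ===== PORT A =====
def build_medclip_ignore_ids (anchor_vocab : List (List (String × String))) : List (List Int) :=
  let buckets :=
    (PySem.List.enumerate anchor_vocab).foldl
      (fun b p =>
        let key := ((PySem.Dict.mk p.2).getD "source" "", (PySem.Dict.mk p.2).getD "field" "")
        b.insert key (b.getD key [] ++ [p.1]))
      (PySem.Dict.mk [])
  anchor_vocab.foldl
    (fun acc anchor =>
      let key := ((PySem.Dict.mk anchor).getD "source" "", (PySem.Dict.mk anchor).getD "field" "")
      acc ++ [buckets.getD key []])
    []

-- ===== PORT B =====
def build_medclip_ignore_ids_alt (anchor_vocab : List (List (String × String))) : List (List Int) :=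
  let keys := anchor_vocab.map (fun a => ((PySem.Dict.mk a).getD "source" "", (PySem.Dict.mk a).getD "field" ""))
  keys.map (fun k => ((PySem.List.enumerate keys).filter (fun p => p.2 == k)).map (fun p => p.1))

-- ===== PRECONDITION & SPEC =====
def Spec_build_medclip_ignore_ids (anchor_vocab : List (List (String × String))) (out : List (List Int)) : Prop := out = build_medclip_ignore_ids_alt anchor_vocab
instance (anchor_vocab : List (List (String × String))) (out : List (List Int)) : Decidable (Spec_build_medclip_ignore_ids anchor_vocab out) := by unfold Spec_build_medclip_ignore_ids; infer_instance

-- ===== CLAIM (what is proved, stated in full; the proofs are below) =====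
def Claim_equal_build_medclip_ignore_ids : Prop := ∀ (anchor_vocab : List (List (String × String))), Dom_build_medclip_ignore_ids anchor_vocab → Spec_build_medclip_ignore_ids anchor_vocab (build_medclip_ignore_ids anchor_vocab)

-- ===== LEMMAS AND PROOFS =====

-- the key of one anchor, used only by the proofs
def pvKey (a : List (String × String)) : String × String :=
  ((PySem.Dict.mk a).getD "source" "", (PySem.Dict.mk a).getD "field" "")

-- A's second loop is a map
theorem pv_foldl_append_map {α β : Type} (g : α → β) :
    ∀ (l : List α) (acc : List β),
      l.foldl (fun acc a => acc ++ [g a]) acc = acc ++ l.map g := by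
  intro l
  induction l with
  | nil => intro acc; simp
  | cons x xs ih => intro acc; simp [List.foldl, ih, List.map]

-- characterisation of the bucket dictionary A builds
theorem pv_bucket_getD (k : String × String) :
    ∀ (l : List (Int × List (String × String)))
      (b : PySem.Dict (String × String) (List Int)),
      (l.foldl
        (fun b p =>
          let key := ((PySem.Dict.mk p.2).getD "source" "", (PySem.Dict.mk p.2).getD "field" "")
          b.insert key (b.getD key [] ++ [p.1])) b).getD k []
      = b.getD k [] ++ ((l.filter (fun p => pvKey p.2 == k)).map (fun p => p.1)) := by
  intro l
  induction l with
  | nil => intro b; simp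
  | cons x xs ih =>
    intro b
    simp only [List.foldl, List.filter_cons]
    rw [ih, PySem.Dict.getD_insert]
    by_cases h : k = ((PySem.Dict.mk x.2).getD "source" "", (PySem.Dict.mk x.2).getD "field" "")
    · simp [h, pvKey]
    · have hne : (((PySem.Dict.mk x.2).getD "source" "", (PySem.Dict.mk x.2).getD "field" "") : String × String) ≠ k :=
        fun hh => h hh.symm
      simp [h, pvKey, hne]

-- pushing a map through enumerate+filter on the B side
theorem pv_enum_map_filter {α β : Type} [BEq β] (f : α → β) (k : β) :
    ∀ (l : List α) (s : Int),
      ((PySem.List.enumerate (l.map f) s).filter (fun p => p.2 == k)).map (fun p => p.1)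
      = ((PySem.List.enumerate l s).filter (fun p => f p.2 == k)).map (fun p => p.1) := by
  intro l
  induction l with
  | nil => intro s; simp [PySem.List.enumerate_nil]
  | cons x xs ih =>
    intro s
    simp only [List.map, PySem.List.enumerate_cons, List.filter]
    by_cases h : (f x == k) = true
    · simp [h, ih]
    · simp at h
      have hb : (f x == k) = false := by simpa using h
      simp [hb, ih]

-- ===== VERDICT (by name: the statement is the Claim_ definition above) =====
theorem build_medclip_ignore_ids_spec : Claim_equal_build_medclip_ignore_ids := by
  intro av _
  show build_medclip_ignore_ids av = build_medclip_ignore_ids_alt av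
  unfold build_medclip_ignore_ids build_medclip_ignore_ids_alt
  rw [pv_foldl_append_map]
  rw [List.map_map]
  simp only [List.nil_append]
  apply List.map_congr_left
  intro a _
  simp only [Function.comp_apply]
  rw [pv_bucket_getD, pv_enum_map_filter]
  simp [pvKey, PySem.Dict.getD, PySem.Dict.get?]
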